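-- pv_equiv track=rewrite | github.com/Ahmed-Hibet/leetcode | 0091-decode-ways/0091-decode-ways.py | handleZeros
-- ===== SOURCE A (Python) =====
-- def handleZeros(s: str) -> str:
--     result = ''
--     skip = False
--
--     for i in s[::-1]:
--         if skip:
--             if i not in '12':
--                 return ''
--             skip = False
--             continue
--         if i == '0':
--             skip = True
--         result += i
--     if skip:
--         return ''
--     return result[::-1]
-- ===== SOURCE B (Python) =====
-- def handleZeros(s: str) -> str:
--     stack = []
--     for c in s:
--         if c == '0':
--             if not stack or stack[-1] not in '12':
--                 return ''
--             stack.pop()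
--             stack.append('0')
--         else:
--             stack.append(c)
--     return ''.join(stack)
-- ===== Notes on version B (the rewrite author's own statement) =====
-- stated objective: idiomatic
-- what changed: Replaced A's reverse scan with a boolean skip flag and a reversed string accumulator by a single forward scan maintaining an explicit stack: each '0' pops its predecessor (which must be '1' or '2') and the answer is ''.join(stack), with no reversals.
import Mathlib
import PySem

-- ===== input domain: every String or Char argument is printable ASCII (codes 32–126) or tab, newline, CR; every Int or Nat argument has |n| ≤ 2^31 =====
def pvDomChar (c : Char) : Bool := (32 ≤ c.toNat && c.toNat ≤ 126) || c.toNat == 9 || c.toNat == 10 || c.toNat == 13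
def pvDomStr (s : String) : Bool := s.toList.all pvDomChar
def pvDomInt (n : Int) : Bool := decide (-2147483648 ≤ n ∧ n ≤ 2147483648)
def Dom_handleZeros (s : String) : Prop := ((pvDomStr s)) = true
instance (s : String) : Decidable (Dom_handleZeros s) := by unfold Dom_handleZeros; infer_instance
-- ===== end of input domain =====

-- B replaces A's reverse scan + skip flag + double reversal by one forward scan with an
-- explicit stack (more idiomatic); return values are proved identical on all inputs.

-- ===== PORT A =====
-- the loop 'for i in s[::-1]' with state (skip, result), early 'return ""' inlined;
-- s[::-1] is s.toList.reverse (exact: PySem.Str.slice?_none_none_neg_one), result[::-1] likewise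
def goA : List Char → Bool → List Char → String
  | [], skip, res => if skip then "" else String.mk res.reverse
  | c :: rest, skip, res =>
    if skip then
      if ¬ (c = '1' ∨ c = '2') then ""           -- 'if i not in "12": return ""'
      else goA rest false res                     -- 'skip = False; continue'
    else if c = '0' then goA rest true (res ++ [c])
    else goA rest false (res ++ [c])

def handleZeros (s : String) : String := goA s.toList.reverse false []

-- ===== PORT B =====
-- forward loop over s with an explicit stack; ''.join(stack) at the end
def goB : List Char → List Char → String
  | [], stack => String.mk stack                  -- ''.join(stack)
  | c :: rest, stack =>
    if c = '0' then
      match stack.getLast? with                   -- 'not stack or stack[-1] not in "12"'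
      | none => ""
      | some t =>
        if ¬ (t = '1' ∨ t = '2') then ""
        else goB rest (stack.dropLast ++ ['0'])   -- 'stack.pop(); stack.append("0")'
    else goB rest (stack ++ [c])

def handleZeros_alt (s : String) : String := goB s.toList []

-- ===== PRECONDITION & SPEC =====
def Spec_handleZeros (s : String) (out : String) : Prop := out = handleZeros_alt s
instance (s : String) (out : String) : Decidable (Spec_handleZeros s out) := by unfold Spec_handleZeros; infer_instance

-- ===== CLAIM (what is proved, stated in full; the proofs are below) =====
def Claim_equal_handleZeros : Prop := ∀ (s : String), Dom_handleZeros s → Spec_handleZeros s (handleZeros s)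

-- ===== LEMMAS AND PROOFS =====

-- spec of A's reverse scan: a head '0' consumes the next char, which must be '1'/'2'
def G : List Char → Option (List Char)
  | [] => some []
  | c :: rest =>
    if c = '0' then
      match rest with
      | [] => none
      | d :: rest' => if d = '1' ∨ d = '2' then (G rest').map (fun out => '0' :: out) else none
    else (G rest).map (fun out => c :: out)

-- spec of B's forward scan: c is the last accepted char, process the remainder
def Fw : Char → List Char → Option (List Char)
  | c, [] => some [c]
  | c, d :: rest =>
    if d = '0' then (if c = '1' ∨ c = '2' then Fw '0' rest else none)
    else (Fw d rest).map (fun out => c :: out)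

def S : List Char → Option (List Char)
  | [] => some []
  | c :: rest => if c = '0' then none else Fw c rest

-- clean one-step equations
theorem goA_nil (skip : Bool) (res : List Char) :
    goA [] skip res = if skip then "" else String.mk res.reverse := rfl

theorem goA_skip_ok {c : Char} (rest res : List Char) (h : c = '1' ∨ c = '2') :
    goA (c :: rest) true res = goA rest false res := by
  rw [goA]; simp [h]

theorem goA_skip_bad {c : Char} (rest res : List Char) (h : ¬ (c = '1' ∨ c = '2')) :
    goA (c :: rest) true res = "" := by
  rw [goA]; simp [h]

theorem goA_zero (rest res : List Char) :
    goA ('0' :: rest) false res = goA rest true (res ++ ['0']) := by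
  rw [goA]; simp

theorem goA_nz {c : Char} (rest res : List Char) (h : ¬ c = '0') :
    goA (c :: rest) false res = goA rest false (res ++ [c]) := by
  rw [goA]; simp [h]

theorem goB_nil (st : List Char) : goB [] st = String.mk st := rfl

theorem goB_zero_empty (rest : List Char) : goB ('0' :: rest) [] = "" := by
  rw [goB]; simp

theorem goB_zero_ok {c : Char} (rest acc : List Char) (h : c = '1' ∨ c = '2') :
    goB ('0' :: rest) (acc ++ [c]) = goB rest (acc ++ ['0']) := by
  rw [goB]; simp [h]

theorem goB_zero_bad {c : Char} (rest acc : List Char) (h : ¬ (c = '1' ∨ c = '2')) :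
    goB ('0' :: rest) (acc ++ [c]) = "" := by
  rw [goB]; simp [h]

theorem goB_nz {c : Char} (rest st : List Char) (h : ¬ c = '0') :
    goB (c :: rest) st = goB rest (st ++ [c]) := by
  rw [goB]; simp [h]

theorem G_nil : G [] = some [] := rfl

theorem G_zero_nil : G ['0'] = none := by rw [G.eq_def]; simp

theorem G_zero_ok {d : Char} (rest : List Char) (h : d = '1' ∨ d = '2') :
    G ('0' :: d :: rest) = (G rest).map (fun out => '0' :: out) := by
  rw [G.eq_def]; simp [h]

theorem G_zero_bad {d : Char} (rest : List Char) (h : ¬ (d = '1' ∨ d = '2')) :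
    G ('0' :: d :: rest) = none := by
  rw [G.eq_def]; simp [h]

theorem G_nz {c : Char} (rest : List Char) (h : ¬ c = '0') :
    G (c :: rest) = (G rest).map (fun out => c :: out) := by
  rw [G.eq_def]; simp [h]

theorem Fw_nil (c : Char) : Fw c [] = some [c] := rfl

theorem Fw_zero (c : Char) (rest : List Char) :
    Fw c ('0' :: rest) = if c = '1' ∨ c = '2' then Fw '0' rest else none := by
  rw [Fw]; simp

theorem Fw_nz (c : Char) {d : Char} (rest : List Char) (h : ¬ d = '0') :
    Fw c (d :: rest) = (Fw d rest).map (fun out => c :: out) := by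
  rw [Fw]; simp [h]

-- A's loop computes G (of the reversed string), accumulated in res
theorem goA_G (r : List Char) : ∀ res : List Char,
    goA r false res = match G r with
      | none => ""
      | some out => String.mk (res ++ out).reverse := by
  induction r using G.induct with
  | case1 => intro res; simp [goA_nil, G_nil]
  | case2 =>
      intro res
      rw [goA_zero, goA_nil, G_zero_nil]
      simp
  | case3 d rest' hd ih =>
      intro res
      rw [goA_zero, goA_skip_ok _ _ hd, ih, G_zero_ok _ hd]
      cases hG : G rest' <;> simp [hG]
  | case4 d rest' hd =>
      intro res
      rw [goA_zero, goA_skip_bad _ _ hd, G_zero_bad _ hd]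
  | case5 c rest h ih =>
      intro res
      rw [goA_nz _ _ h, ih, G_nz _ h]
      cases hG : G rest <;> simp [hG]

-- B's loop computes Fw of the remainder, given the last accepted char c on the stack
theorem goB_Fw (rest : List Char) : ∀ (c : Char) (acc : List Char),
    goB rest (acc ++ [c]) = match Fw c rest with
      | none => ""
      | some out => String.mk (acc ++ out) := by
  induction rest with
  | nil => intro c acc; simp [goB_nil, Fw_nil]
  | cons d rest ih =>
      intro c acc
      by_cases hd : d = '0'
      · subst hd
        by_cases hc : c = '1' ∨ c = '2'
        · rw [goB_zero_ok _ _ hc, ih, Fw_zero, if_pos hc]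
        · rw [goB_zero_bad _ _ hc, Fw_zero, if_neg hc]
      · rw [goB_nz _ _ hd, ih, Fw_nz _ _ hd]
        cases hF : Fw d rest <;> simp [hF]

theorem Fw_snoc_nonzero (rest : List Char) : ∀ (c d : Char), ¬ d = '0' →
    Fw c (rest ++ [d]) = (Fw c rest).map (fun out => out ++ [d]) := by
  induction rest with
  | nil => intro c d hd; rw [List.nil_append, Fw_nz _ _ hd]; simp [Fw_nil]
  | cons e rest ih =>
      intro c d hd
      by_cases he : e = '0'
      · subst he
        rw [List.cons_append, Fw_zero, Fw_zero]
        by_cases hc : c = '1' ∨ c = '2' <;> simp [hc, ih _ _ hd]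
      · rw [List.cons_append, Fw_nz _ _ he, Fw_nz _ _ he, ih _ _ hd]
        cases hF : Fw e rest <;> simp [hF]

theorem Fw_snoc_zero (rest : List Char) : ∀ (c e : Char),
    Fw c (rest ++ [e, '0']) =
      if e = '1' ∨ e = '2' then (Fw c rest).map (fun out => out ++ ['0']) else none := by
  induction rest with
  | nil =>
      intro c e
      by_cases he : e = '0'
      · subst he
        have h0 : ¬ (('0' : Char) = '1' ∨ ('0' : Char) = '2') := by decide
        rw [List.nil_append, Fw_zero]
        by_cases hc : c = '1' ∨ c = '2' <;> simp [hc, h0, Fw_zero, Fw_nil]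
      · rw [List.nil_append, Fw_nz _ _ he, Fw_zero, Fw_nil]
        by_cases he12 : e = '1' ∨ e = '2' <;> simp [he12, Fw_nil]
  | cons f rest ih =>
      intro c e
      by_cases hf : f = '0'
      · subst hf
        rw [List.cons_append, Fw_zero, Fw_zero, ih '0' e]
        by_cases hc : c = '1' ∨ c = '2' <;>
          by_cases he12 : e = '1' ∨ e = '2' <;> simp [hc, he12]
      · rw [List.cons_append, Fw_nz _ _ hf, Fw_nz _ _ hf, ih f e]
        by_cases he12 : e = '1' ∨ e = '2' <;> cases hF : Fw f rest <;> simp [he12, hF]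

-- the reverse-scan spec G equals the forward spec Fw, up to reversal
theorem G_rev (r : List Char) : ∀ c : Char,
    G (r ++ [c]) = if c = '0' then none else (Fw c r.reverse).map List.reverse := by
  induction r using G.induct with
  | case1 =>
      intro c
      by_cases hc : c = '0' <;> simp [G.eq_2, G_nil, Fw_nil, hc]
  | case2 =>
      intro c
      have h0 : ¬ (('0' : Char) = '0') → False := fun h => h rfl
      show G ('0' :: [c]) = _
      by_cases hc12 : c = '1' ∨ c = '2'
      · have hc : ¬ c = '0' := by rcases hc12 with h | h <;> subst h <;> decide
        rw [G_zero_ok _ hc12]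
        simp [G_nil, Fw_zero, hc12, hc, Fw_nil]
      · rw [G_zero_bad _ hc12]
        by_cases hc : c = '0' <;> simp [hc, Fw_zero, hc12]
  | case3 d rest' hd ih =>
      intro c
      show G ('0' :: d :: (rest' ++ [c])) = _
      rw [G_zero_ok _ hd, ih c,
        show ('0' :: d :: rest').reverse = rest'.reverse ++ [d, '0'] by simp,
        Fw_snoc_zero, if_pos hd]
      by_cases hc : c = '0'
      · simp [hc]
      · rw [if_neg hc, if_neg hc]
        cases hF : Fw c rest'.reverse <;> simp [hF]
  | case4 d rest' hd =>
      intro c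
      show G ('0' :: d :: (rest' ++ [c])) = _
      rw [G_zero_bad _ hd,
        show ('0' :: d :: rest').reverse = rest'.reverse ++ [d, '0'] by simp,
        Fw_snoc_zero, if_neg hd]
      by_cases hc : c = '0' <;> simp [hc]
  | case5 c0 rest h ih =>
      intro c
      show G (c0 :: (rest ++ [c])) = _
      rw [G_nz _ h, ih c,
        show (c0 :: rest).reverse = rest.reverse ++ [c0] by simp,
        Fw_snoc_nonzero _ _ _ h]
      by_cases hc : c = '0'
      · simp [hc]
      · rw [if_neg hc, if_neg hc]
        cases hF : Fw c rest.reverse <;> simp [hF]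

theorem A_top (l : List Char) :
    goA l.reverse false [] = match S l with
      | none => ""
      | some out => String.mk out := by
  cases l with
  | nil => simp [goA_nil, S]
  | cons c rest =>
      rw [show (c :: rest).reverse = rest.reverse ++ [c] by simp, goA_G, G_rev,
        List.reverse_reverse]
      by_cases hc : c = '0'
      · simp [S, hc]
      · simp only [S, if_neg hc]
        cases hF : Fw c rest <;> simp [hF]

theorem B_top (l : List Char) :
    goB l [] = match S l with
      | none => ""
      | some out => String.mk out := by
  cases l with
  | nil => simp [goB_nil, S]
  | cons c rest =>
      by_cases hc : c = '0'
      · subst hc; simp [goB_zero_empty, S]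
      · rw [show goB (c :: rest) [] = goB rest ([] ++ [c]) from goB_nz _ _ hc, goB_Fw]
        simp only [S, if_neg hc]
        cases hF : Fw c rest <;> simp [hF]

-- ===== VERDICT (by name: the statement is the Claim_ definition above) =====
theorem handleZeros_spec : Claim_equal_handleZeros := by
  intro s _
  unfold Spec_handleZeros handleZeros handleZeros_alt
  rw [A_top, B_top]
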